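-- pv_equiv track=rewrite | github.com/ttfnrob/astropipeline | astroagent/agents/experimenter.py | _select_analysis_variables
-- ===== SOURCE A (Python) =====
-- from typing import Any, Dict, List, Optional, Tuple
--
-- def _select_analysis_variables(numeric_cols: List[str], hypothesis: str) -> Tuple[str, str]:
--     """Select the most appropriate variables for analysis based on hypothesis."""
--
--     # Common astronomical variable patterns
--     magnitude_cols = [col for col in numeric_cols if any(mag in col.lower() for mag in ['mag', 'phot', 'flux'])]
--     distance_cols = [col for col in numeric_cols if any(dist in col.lower() for dist in ['plx', 'dist', 'parallax'])]
--     spectral_cols = [col for col in numeric_cols if any(spec in col.lower() for spec in ['bp', 'rp', 'color', 'index'])]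
--
--     # Try to pick meaningful combinations
--     if magnitude_cols and distance_cols:
--         return magnitude_cols[0], distance_cols[0]
--     elif len(magnitude_cols) >= 2:
--         return magnitude_cols[0], magnitude_cols[1]
--     elif magnitude_cols and spectral_cols:
--         return magnitude_cols[0], spectral_cols[0]
--     else:
--         # Fall back to first two numeric columns
--         return numeric_cols[0], numeric_cols[1]
-- ===== SOURCE B (Python) =====
-- def _select_analysis_variables(numeric_cols, hypothesis):
--     """Single pass: classify each column once, keeping only first/second matches."""
--     mag1 = mag2 = dist1 = spec1 = None
--     for col in numeric_cols:
--         lc = col.lower()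
--         if 'mag' in lc or 'phot' in lc or 'flux' in lc:
--             if mag1 is None:
--                 mag1 = col
--             elif mag2 is None:
--                 mag2 = col
--         if 'plx' in lc or 'dist' in lc or 'parallax' in lc:
--             if dist1 is None:
--                 dist1 = col
--         if 'bp' in lc or 'rp' in lc or 'color' in lc or 'index' in lc:
--             if spec1 is None:
--                 spec1 = col
--     if mag1 is not None and dist1 is not None:
--         return mag1, dist1
--     if mag2 is not None:
--         return mag1, mag2
--     if mag1 is not None and spec1 is not None:
--         return mag1, spec1
--     return numeric_cols[0], numeric_cols[1]
-- ===== Notes on version B (the rewrite author's own statement) =====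
-- stated objective: alternative
-- what changed: Replaces the three full filter passes building intermediate lists with a single loop that classifies each column once, maintaining only first/second-match sentinels.
import Mathlib
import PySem

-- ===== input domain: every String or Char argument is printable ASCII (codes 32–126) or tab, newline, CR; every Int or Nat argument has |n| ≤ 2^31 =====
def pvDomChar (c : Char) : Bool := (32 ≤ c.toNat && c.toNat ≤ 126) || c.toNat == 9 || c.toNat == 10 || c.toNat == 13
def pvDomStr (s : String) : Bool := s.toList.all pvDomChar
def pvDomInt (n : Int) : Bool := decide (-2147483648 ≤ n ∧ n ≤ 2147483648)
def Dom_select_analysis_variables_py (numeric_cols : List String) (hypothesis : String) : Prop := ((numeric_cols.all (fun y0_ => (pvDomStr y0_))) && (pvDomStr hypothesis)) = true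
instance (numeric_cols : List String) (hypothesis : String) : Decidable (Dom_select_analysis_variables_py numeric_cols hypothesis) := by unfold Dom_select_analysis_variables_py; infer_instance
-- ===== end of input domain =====

-- B replaces A's three filter passes by a single classifying loop with first/second-match sentinels (alternative decomposition, same cost class).

-- shared column classifiers ('any pat in col.lower() for pat in …')
def pvIsMag (c : String) : Bool := ["mag", "phot", "flux"].any (fun p => PySem.Str.isIn p (PySem.Str.lower c))
def pvIsDist (c : String) : Bool := ["plx", "dist", "parallax"].any (fun p => PySem.Str.isIn p (PySem.Str.lower c))
def pvIsSpec (c : String) : Bool := ["bp", "rp", "color", "index"].any (fun p => PySem.Str.isIn p (PySem.Str.lower c))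

-- ===== PORT A =====
def select_analysis_variables_py (numeric_cols : List String) (hypothesis : String) : String × String :=
  let magnitude_cols := numeric_cols.filter pvIsMag
  let distance_cols := numeric_cols.filter pvIsDist
  let spectral_cols := numeric_cols.filter pvIsSpec
  if !magnitude_cols.isEmpty && !distance_cols.isEmpty then
    (magnitude_cols.headD "", distance_cols.headD "")
  else if 2 ≤ magnitude_cols.length then
    (magnitude_cols.headD "", magnitude_cols.getD 1 "")
  else if !magnitude_cols.isEmpty && !spectral_cols.isEmpty then
    (magnitude_cols.headD "", spectral_cols.headD "")
  else
    -- numeric_cols[0], numeric_cols[1]: Pre_ guarantees 2 ≤ length here (else Python raises IndexError)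
    (numeric_cols.headD "", numeric_cols.getD 1 "")

-- ===== PORT B =====
-- state = (mag1, mag2, dist1, spec1)
def pvStepB (st : Option String × Option String × Option String × Option String) (col : String) :
    Option String × Option String × Option String × Option String :=
  let (m1, m2, d1, s1) := st
  let (m1, m2) :=
    if pvIsMag col then
      match m1, m2 with
      | none, m2 => (some col, m2)
      | some a, none => (some a, some col)
      | some a, some b => (some a, some b)
    else (m1, m2)
  let d1 := if pvIsDist col then (match d1 with | none => some col | some a => some a) else d1
  let s1 := if pvIsSpec col then (match s1 with | none => some col | some a => some a) else s1
  (m1, m2, d1, s1)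

def select_analysis_variables_py_alt (numeric_cols : List String) (hypothesis : String) : String × String :=
  let (m1, m2, d1, s1) := numeric_cols.foldl pvStepB (none, none, none, none)
  match m1, m2, d1, s1 with
  | some a, _, some b, _ => (a, b)
  | some a, some b, none, _ => (a, b)
  | some a, none, none, some b => (a, b)
  | _, _, _, _ => (numeric_cols.headD "", numeric_cols.getD 1 "")

-- ===== PRECONDITION & SPEC =====
-- Pre_ excludes exactly the inputs where A (and B) raise IndexError: the fallback branch reached with fewer than two columns.
def Pre_select_analysis_variables_py (numeric_cols : List String) (hypothesis : String) : Prop :=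
  (numeric_cols.any pvIsMag = true ∧ numeric_cols.any pvIsDist = true)
  ∨ 2 ≤ (numeric_cols.filter pvIsMag).length
  ∨ (numeric_cols.any pvIsMag = true ∧ numeric_cols.any pvIsSpec = true)
  ∨ 2 ≤ numeric_cols.length
instance (numeric_cols : List String) (hypothesis : String) : Decidable (Pre_select_analysis_variables_py numeric_cols hypothesis) := by unfold Pre_select_analysis_variables_py; infer_instance

def pvWitness_select_analysis_variables_py : List String × String := (["Gmag", "plx_val"], "h")

def Spec_select_analysis_variables_py (numeric_cols : List String) (hypothesis : String) (out : String × String) : Prop := out = select_analysis_variables_py_alt numeric_cols hypothesis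
instance (numeric_cols : List String) (hypothesis : String) (out : String × String) : Decidable (Spec_select_analysis_variables_py numeric_cols hypothesis out) := by unfold Spec_select_analysis_variables_py; infer_instance

-- ===== CLAIM (what is proved, stated in full; the proofs are below) =====
def Claim_equal_select_analysis_variables_py : Prop := ∀ (numeric_cols : List String) (hypothesis : String), Dom_select_analysis_variables_py numeric_cols hypothesis → Pre_select_analysis_variables_py numeric_cols hypothesis → Spec_select_analysis_variables_py numeric_cols hypothesis (select_analysis_variables_py numeric_cols hypothesis)

-- ===== LEMMAS AND PROOFS =====

-- how one sentinel is filled from the remaining matches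
def pvFill1 (o : Option String) (l : List String) : Option String :=
  match o with | some a => some a | none => l.head?

def pvFill2 (m1 m2 : Option String) (l : List String) : Option String × Option String :=
  match m1, m2 with
  | none, none => (l.head?, (l.drop 1).head?)
  | none, some b => (l.head?, some b)
  | some a, none => (some a, l.head?)
  | some a, some b => (some a, some b)

theorem pvFold_spec (xs : List String) (m1 m2 d1 s1 : Option String) :
    xs.foldl pvStepB (m1, m2, d1, s1) =
      ((pvFill2 m1 m2 (xs.filter pvIsMag)).1,
       (pvFill2 m1 m2 (xs.filter pvIsMag)).2,
       pvFill1 d1 (xs.filter pvIsDist),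
       pvFill1 s1 (xs.filter pvIsSpec)) := by
  induction xs generalizing m1 m2 d1 s1 with
  | nil => cases m1 <;> cases m2 <;> cases d1 <;> cases s1 <;> rfl
  | cons x t ih =>
    simp only [List.foldl_cons, pvStepB, List.filter_cons]
    cases hm : pvIsMag x <;> cases hd : pvIsDist x <;> cases hs : pvIsSpec x <;>
      cases m1 <;> cases m2 <;> cases d1 <;> cases s1 <;>
      simp [ih, pvFill1, pvFill2, List.head?_filter]

theorem select_analysis_variables_py_spec : Claim_equal_select_analysis_variables_py := by
  intro numeric_cols hypothesis _ _
  unfold Spec_select_analysis_variables_py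
  unfold select_analysis_variables_py select_analysis_variables_py_alt
  simp only [pvFold_spec]
  rcases hFm : numeric_cols.filter pvIsMag with _ | ⟨a, _ | ⟨b, tm⟩⟩ <;>
    rcases hFd : numeric_cols.filter pvIsDist with _ | ⟨c, td⟩ <;>
      rcases hFs : numeric_cols.filter pvIsSpec with _ | ⟨e, ts⟩ <;>
        simp_all [pvFill1, pvFill2]
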